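-- pv_equiv track=rewrite | github.com/azgarian/rootNumberDetection | src/training/train.py | _build_group_stats
-- ===== SOURCE A (Python) =====
-- from typing import List, Dict, Tuple
--
-- def _build_group_stats(pids: List[str], labels: List[int]) -> Tuple[Dict[str, List[int]], Dict[str, List[int]]]:
--     classes = sorted(set(int(l) for l in labels))
--     pos = {c: i for i, c in enumerate(classes)}
--     g2idx: Dict[str, List[int]] = {}
--     g2cnt: Dict[str, List[int]] = {}
--     for i, gid in enumerate(pids):
--         if gid not in g2idx:
--             g2idx[gid] = []
--             g2cnt[gid] = [0] * len(classes)
--         g2idx[gid].append(i)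
--         j = pos[int(labels[i])]
--         g2cnt[gid][j] += 1
--     return g2idx, g2cnt
-- ===== SOURCE B (Python) =====
-- from typing import List, Dict, Tuple
--
-- def _build_group_stats(pids: List[str], labels: List[int]) -> Tuple[Dict[str, List[int]], Dict[str, List[int]]]:
--     classes = sorted(set(int(l) for l in labels))
--     g2idx: Dict[str, List[int]] = {}
--     for i, gid in enumerate(pids):
--         g2idx.setdefault(gid, []).append(i)
--     g2cnt: Dict[str, List[int]] = {}
--     for gid, idxs in g2idx.items():
--         cnt: Dict[int, int] = {}
--         for i in idxs:
--             x = int(labels[i])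
--             cnt[x] = cnt.get(x, 0) + 1
--         g2cnt[gid] = [cnt.get(c, 0) for c in classes]
--     return g2idx, g2cnt
-- ===== Notes on version B (the rewrite author's own statement) =====
-- stated objective: alternative
-- what changed: Replaces the fused single loop that maintains two dicts via a class-position table and in-place count-vector increments by an index-first build of g2idx with setdefault, then a separate per-group pass that tallies labels into a small counting dict and reads the vector off with cnt.get(c, 0) per class.
import Mathlib
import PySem

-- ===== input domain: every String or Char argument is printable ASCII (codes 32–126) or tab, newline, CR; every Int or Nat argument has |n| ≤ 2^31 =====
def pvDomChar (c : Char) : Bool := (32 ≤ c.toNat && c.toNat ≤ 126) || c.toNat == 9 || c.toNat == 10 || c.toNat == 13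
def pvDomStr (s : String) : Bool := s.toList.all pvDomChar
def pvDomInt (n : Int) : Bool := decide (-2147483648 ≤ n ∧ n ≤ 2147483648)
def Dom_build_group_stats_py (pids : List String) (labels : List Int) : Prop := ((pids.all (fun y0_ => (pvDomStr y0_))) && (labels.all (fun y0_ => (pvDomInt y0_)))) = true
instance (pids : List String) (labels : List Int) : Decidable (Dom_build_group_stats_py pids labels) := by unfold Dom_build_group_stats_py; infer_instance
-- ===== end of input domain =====

-- B replaces A's fused single loop (two dicts, a class-position table, in-place count-vector increments)
-- by an index-first build of g2idx and a separate per-group counting pass (alternative decomposition, same cost).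

-- classes = sorted(set(int(l) for l in labels)) — the identical first line of both Pythons
def pvClasses (labels : List Int) : List Int :=
  PySem.List.sorted (PySem.Set.ofList labels) (fun x => x) false

-- ===== PORT A =====
-- pos = {c: i for i, c in enumerate(classes)}
def pvPos (labels : List Int) : PySem.Dict Int Int :=
  (PySem.List.enumerate (pvClasses labels)).foldl (fun d p => d.insert p.2 p.1) PySem.Dict.empty

-- the body of A's fused for-loop over enumerate(pids); state = (g2idx, g2cnt)
-- 'g2cnt[gid][j] += 1' is ported as v.set j.toNat (v[j]+1): exact since 0 ≤ j < len(classes) there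
def pvAStep (labels : List Int)
    (st : PySem.Dict String (List Int) × PySem.Dict String (List Int)) (p : Int × String) :
    PySem.Dict String (List Int) × PySem.Dict String (List Int) :=
  let st := if st.1.contains p.2 then st
            else (st.1.insert p.2 [], st.2.insert p.2 (List.replicate (pvClasses labels).length (0 : Int)))
  let g2idx := st.1.modify p.2 [] (fun v => v ++ [p.1])
  let j := (pvPos labels).getD ((PySem.List.pyGet? labels p.1).getD 0) 0
  let g2cnt := st.2.modify p.2 [] (fun v => v.set j.toNat ((PySem.List.pyGet? v j).getD 0 + 1))
  (g2idx, g2cnt)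

def build_group_stats_py (pids : List String) (labels : List Int) :
    (List (String × List Int)) × (List (String × List Int)) :=
  let st := (PySem.List.enumerate pids).foldl (pvAStep labels) (PySem.Dict.empty, PySem.Dict.empty)
  (st.1.items, st.2.items)

-- ===== PORT B =====
-- per-group counting dict: cnt = {}; for i in idxs: x = int(labels[i]); cnt[x] = cnt.get(x, 0) + 1
-- then [cnt.get(c, 0) for c in classes]
def pvCntVec (labels : List Int) (idxs : List Int) : List Int :=
  let cnt : PySem.Dict Int Int :=
    idxs.foldl (fun d i =>
      d.insert ((PySem.List.pyGet? labels i).getD 0)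
        (d.getD ((PySem.List.pyGet? labels i).getD 0) 0 + 1)) PySem.Dict.empty
  (pvClasses labels).map (fun c => cnt.getD c 0)

-- g2idx.setdefault(gid, []).append(i)
def pvBStep (d : PySem.Dict String (List Int)) (p : Int × String) : PySem.Dict String (List Int) :=
  d.modify p.2 [] (fun v => v ++ [p.1])

def build_group_stats_py_alt (pids : List String) (labels : List Int) :
    (List (String × List Int)) × (List (String × List Int)) :=
  let g2idx := (PySem.List.enumerate pids).foldl pvBStep PySem.Dict.empty
  (g2idx.items, g2idx.items.map (fun q => (q.1, pvCntVec labels q.2)))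

-- ===== PRECONDITION & SPEC =====
-- A raises IndexError at labels[i] iff len(pids) > len(labels); Pre_ excludes exactly those inputs.
def Pre_build_group_stats_py (pids : List String) (labels : List Int) : Prop :=
  pids.length ≤ labels.length
instance (pids : List String) (labels : List Int) : Decidable (Pre_build_group_stats_py pids labels) := by unfold Pre_build_group_stats_py; infer_instance
def pvWitness_build_group_stats_py : List String × List Int := (["a", "b", "a"], [2, 0, 2])

def Spec_build_group_stats_py (pids : List String) (labels : List Int) (out : (List (String × List Int)) × (List (String × List Int))) : Prop := out = build_group_stats_py_alt pids labels
instance (pids : List String) (labels : List Int) (out : (List (String × List Int)) × (List (String × List Int))) : Decidable (Spec_build_group_stats_py pids labels out) := by unfold Spec_build_group_stats_py; infer_instance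

-- ===== CLAIM (what is proved, stated in full; the proofs are below) =====
def Claim_equal_build_group_stats_py : Prop := ∀ (pids : List String) (labels : List Int), Dom_build_group_stats_py pids labels → Pre_build_group_stats_py pids labels → Spec_build_group_stats_py pids labels (build_group_stats_py pids labels)
-- ===== LEMMAS AND PROOFS =====

-- (g2cnt as a function of g2idx: the dict B's comprehension builds)
def pvMapCnt (labels : List Int) (d : PySem.Dict String (List Int)) : PySem.Dict String (List Int) :=
  PySem.Dict.mk (d.items.map (fun q => (q.1, pvCntVec labels q.2)))

-- pvCntVec characterised: entry for c counts the idxs whose label is c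
lemma pvCntVec_eq (labels : List Int) (idxs : List Int) :
    pvCntVec labels idxs
      = (pvClasses labels).map
          (fun c => (idxs.countP (fun i => (PySem.List.pyGet? labels i).getD 0 == c) : Int)) := by
  unfold pvCntVec
  apply List.map_congr_left
  intro c _
  have hfm := List.foldl_map (f := fun i : Int => (PySem.List.pyGet? labels i).getD 0)
    (g := fun (d : PySem.Dict Int Int) (x : Int) => d.insert x (d.getD x 0 + 1))
    (l := idxs) (init := PySem.Dict.empty)
  simp only [] at hfm
  rw [← hfm, PySem.Dict.getD_foldl_insert_add_one]
  rw [List.count_eq_countP, List.countP_map]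
  simp [Function.comp_def]

lemma pvClasses_nodup (labels : List Int) : (pvClasses labels).Nodup :=
  ((PySem.List.sorted_perm _ _ _).nodup_iff).mpr (PySem.Set.nodup_ofList labels)

lemma pvClasses_mem (labels : List Int) (x : Int) : x ∈ pvClasses labels ↔ x ∈ labels := by
  unfold pvClasses
  rw [(PySem.List.sorted_perm _ _ _).mem_iff, PySem.Set.mem_ofList]

lemma mem_enumerate_bounds {α : Type} (xs : List α) (s : Int) (p : Int × α)
    (hp : p ∈ PySem.List.enumerate xs s) : s ≤ p.1 ∧ p.1 < s + xs.length := by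
  induction xs generalizing s with
  | nil => simp [PySem.List.enumerate] at hp
  | cons x t ih =>
    simp only [PySem.List.enumerate, List.mem_cons] at hp
    rcases hp with h | h
    · subst h; constructor <;> simp
    · have := ih (s + 1) h
      simp only [List.length_cons]
      omega

lemma foldl_ins_getD_not_mem (t : List Int) (x : Int) (hx : x ∉ t) :
    ∀ (s : Int) (d : PySem.Dict Int Int),
      ((PySem.List.enumerate t s).foldl (fun d p => d.insert p.2 p.1) d).getD x 0 = d.getD x 0 := by
  induction t with
  | nil => intro s d; simp [PySem.List.enumerate]
  | cons c t ih =>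
    intro s d
    simp only [List.mem_cons, not_or] at hx
    simp only [PySem.List.enumerate, List.foldl_cons]
    rw [ih hx.2, PySem.Dict.getD_insert_of_ne _ _ _ hx.1]

lemma pos_foldl_getD (t : List Int) (x : Int) (hnd : t.Nodup) (hx : x ∈ t) :
    ∀ (s : Int) (d : PySem.Dict Int Int),
      ((PySem.List.enumerate t s).foldl (fun d p => d.insert p.2 p.1) d).getD x 0 = s + (t.idxOf x : Int) := by
  induction t with
  | nil => simp at hx
  | cons c t ih =>
    intro s d
    simp only [PySem.List.enumerate, List.foldl_cons]
    rcases List.mem_cons.mp hx with h | h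
    · subst h
      rw [foldl_ins_getD_not_mem t x ((List.nodup_cons.mp hnd).1),
          PySem.Dict.getD_insert_self, List.idxOf_cons_self]
      simp
    · have hne : x ≠ c := by rintro rfl; exact ((List.nodup_cons.mp hnd).1) h
      rw [ih (List.nodup_cons.mp hnd).2 h (s + 1)]
      rw [List.idxOf_cons_ne _ (by exact fun hc => hne hc.symm)]
      push_cast
      omega

lemma pvPos_getD (labels : List Int) (x : Int) (hx : x ∈ pvClasses labels) :
    (pvPos labels).getD x 0 = ((pvClasses labels).idxOf x : Int) := by
  unfold pvPos
  rw [pos_foldl_getD _ _ (pvClasses_nodup labels) hx 0 PySem.Dict.empty]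
  simp

lemma pvCntVec_append (labels : List Int) (idxs : List Int) (i : Int)
    (hi0 : 0 ≤ i) (hilt : i < labels.length) :
    (pvCntVec labels idxs).set ((pvPos labels).getD ((PySem.List.pyGet? labels i).getD 0) 0).toNat
        ((PySem.List.pyGet? (pvCntVec labels idxs)
            ((pvPos labels).getD ((PySem.List.pyGet? labels i).getD 0) 0)).getD 0 + 1)
      = pvCntVec labels (idxs ++ [i]) := by
  have hn : i.toNat < labels.length := by omega
  have hget : PySem.List.pyGet? labels i = some labels[i.toNat] := by
    have h := PySem.List.pyGet?_natCast labels i.toNat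
    rw [show ((i.toNat : Nat) : Int) = i from by omega] at h
    rw [h]
    exact List.getElem?_eq_getElem hn
  have hxm : labels[i.toNat] ∈ pvClasses labels :=
    (pvClasses_mem labels _).mpr (List.getElem_mem hn)
  have hjlt : (pvClasses labels).idxOf labels[i.toNat] < (pvClasses labels).length :=
    List.idxOf_lt_length_of_mem hxm
  have hpos : (pvPos labels).getD ((PySem.List.pyGet? labels i).getD 0) 0
      = (((pvClasses labels).idxOf labels[i.toNat] : Nat) : Int) := by
    rw [hget]
    exact pvPos_getD labels _ hxm
  rw [hpos, pvCntVec_eq, pvCntVec_eq]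
  rw [PySem.List.pyGet?_natCast, Int.toNat_natCast]
  have hjm : (List.map (fun c => ((idxs.countP fun i => (PySem.List.pyGet? labels i).getD 0 == c : Nat) : Int)) (pvClasses labels))[(pvClasses labels).idxOf labels[i.toNat]]?
      = some ((idxs.countP fun i' => (PySem.List.pyGet? labels i').getD 0 == labels[i.toNat] : Nat) : Int) := by
    rw [List.getElem?_map, List.getElem?_eq_getElem hjlt]
    simp only [Option.map_some]
    rw [List.getElem_idxOf hjlt]
  rw [hjm]
  apply List.ext_getElem
  · simp
  · intro m h1 h2
    have hmlt : m < (pvClasses labels).length := by simpa using h2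
    simp only [List.getElem_set, List.getElem_map] at *
    by_cases hm : (pvClasses labels).idxOf labels[i.toNat] = m
    · subst hm
      rw [if_pos rfl, List.getElem_idxOf hjlt]
      rw [List.countP_append]
      simp only [Option.getD_some, List.countP_cons, List.countP_nil, hget]
      simp
    · rw [if_neg hm]
      rw [List.countP_append]
      have hne : ¬ ((PySem.List.pyGet? labels i).getD 0 == (pvClasses labels)[m]'hmlt) = true := by
        rw [hget]
        simp only [Option.getD_some, beq_iff_eq]
        intro heq
        apply hm
        have : (pvClasses labels)[(pvClasses labels).idxOf labels[i.toNat]]'hjlt = (pvClasses labels)[m]'hmlt := by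
          rw [List.getElem_idxOf hjlt, heq]
        exact ((pvClasses_nodup labels).getElem_inj_iff).mp this
      simp only [List.countP_cons, List.countP_nil, hne]
      simp

lemma pvMapCnt_keys (labels : List Int) (d : PySem.Dict String (List Int)) :
    (pvMapCnt labels d).keys = d.keys := by
  simp [pvMapCnt, PySem.Dict.keys, List.map_map, Function.comp]

lemma pvMapCnt_contains (labels : List Int) (d : PySem.Dict String (List Int)) (k : String) :
    (pvMapCnt labels d).contains k = d.contains k := by
  rw [PySem.Dict.contains_eq_decide_mem_keys, PySem.Dict.contains_eq_decide_mem_keys, pvMapCnt_keys]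

lemma pvMapCnt_insert (labels : List Int) (d : PySem.Dict String (List Int)) (k : String) (w : List Int) :
    pvMapCnt labels (d.insert k w) = (pvMapCnt labels d).insert k (pvCntVec labels w) := by
  apply PySem.Dict.ext
  by_cases hc : d.contains k = true
  · have hc' : (pvMapCnt labels d).contains k = true := (pvMapCnt_contains labels d k).trans hc
    show ((d.insert k w).items.map fun q => (q.1, pvCntVec labels q.2)) = _
    rw [PySem.Dict.items_insert_of_contains d w hc,
        PySem.Dict.items_insert_of_contains (pvMapCnt labels d) (pvCntVec labels w) hc']
    show _ = List.map _ (d.items.map fun q => (q.1, pvCntVec labels q.2))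
    rw [List.map_map, List.map_map]
    apply List.map_congr_left
    intro p _
    by_cases hp : (p.1 == k) = true
    · simp [Function.comp, hp]
    · simp [Function.comp, hp]
  · have hc2 : d.contains k = false := by simpa using hc
    have hc' : (pvMapCnt labels d).contains k = false := (pvMapCnt_contains labels d k).trans hc2
    show ((d.insert k w).items.map fun q => (q.1, pvCntVec labels q.2)) = _
    rw [PySem.Dict.items_insert_of_not_contains d w hc2,
        PySem.Dict.items_insert_of_not_contains (pvMapCnt labels d) (pvCntVec labels w) hc']
    simp [pvMapCnt]

lemma pvStep_eq (labels : List Int) (p : Int × String) (hi0 : 0 ≤ p.1) (hilt : p.1 < labels.length)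
    (d : PySem.Dict String (List Int)) (hnd : d.keys.Nodup) :
    pvAStep labels (d, pvMapCnt labels d) p = (pvBStep d p, pvMapCnt labels (pvBStep d p)) := by
  have hrep : List.replicate (pvClasses labels).length (0 : Int) = pvCntVec labels [] := by
    rw [pvCntVec_eq]
    simp [List.map_const']
  by_cases hc : d.contains p.2 = true
  · obtain ⟨v, hv⟩ : ∃ v, d.get? p.2 = some v := by
      rcases h : d.get? p.2 with _ | v
      · rw [PySem.Dict.contains_eq_isSome_get?, h] at hc; simp at hc
      · exact ⟨v, rfl⟩
    have hvD : d.getD p.2 [] = v := PySem.Dict.getD_of_get?_eq_some d [] hv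
    have hmem : (p.2, v) ∈ d.items := PySem.Dict.mem_items_of_get?_eq_some d hv
    have hmem' : (p.2, pvCntVec labels v) ∈ (pvMapCnt labels d).items := by
      show _ ∈ d.items.map fun q => (q.1, pvCntVec labels q.2)
      exact List.mem_map.mpr ⟨(p.2, v), hmem, rfl⟩
    have hnd' : (pvMapCnt labels d).keys.Nodup := by rw [pvMapCnt_keys]; exact hnd
    have hvC : (pvMapCnt labels d).getD p.2 [] = pvCntVec labels v :=
      PySem.Dict.getD_of_mem_items (pvMapCnt labels d) hmem' hnd' []
    unfold pvAStep pvBStep PySem.Dict.modify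
    rw [if_pos hc]
    simp only [hvD, hvC]
    rw [pvMapCnt_insert]
    rw [pvCntVec_append labels v p.1 hi0 hilt]
  · have hc2 : d.contains p.2 = false := by simpa using hc
    have hc' : (pvMapCnt labels d).contains p.2 = false := (pvMapCnt_contains labels d p.2).trans hc2
    unfold pvAStep pvBStep PySem.Dict.modify
    rw [if_neg (by simp [hc2])]
    simp only [PySem.Dict.getD_insert_self, PySem.Dict.insert_insert_self,
      PySem.Dict.getD_of_not_contains d _ hc2, hrep]
    rw [pvMapCnt_insert]
    rw [pvCntVec_append labels [] p.1 hi0 hilt]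

lemma pvLoop_inv (labels : List Int) (l : List (Int × String))
    (hl : ∀ p ∈ l, 0 ≤ p.1 ∧ p.1 < labels.length) :
    ∀ (d : PySem.Dict String (List Int)), d.keys.Nodup →
      l.foldl (pvAStep labels) (d, pvMapCnt labels d) =
        (l.foldl pvBStep d, pvMapCnt labels (l.foldl pvBStep d)) := by
  induction l with
  | nil => intro d hnd; simp
  | cons p t ih =>
    intro d hnd
    have hp := hl p (List.mem_cons_self)
    simp only [List.foldl_cons]
    rw [pvStep_eq labels p hp.1 hp.2 d hnd]
    exact ih (fun q hq => hl q (List.mem_cons_of_mem _ hq)) _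
      (by
        unfold pvBStep PySem.Dict.modify
        exact PySem.Dict.nodup_keys_insert _ _ _ hnd)

-- ===== VERDICT (by name: the statement is the Claim_ definition above) =====
theorem build_group_stats_py_spec : Claim_equal_build_group_stats_py := by
  intro pids labels _ hpre
  unfold Spec_build_group_stats_py build_group_stats_py build_group_stats_py_alt
  have h := pvLoop_inv labels (PySem.List.enumerate pids)
    (fun p hp => by
      have := mem_enumerate_bounds pids 0 p hp
      unfold Pre_build_group_stats_py at hpre
      constructor <;> [omega; (push_cast at this ⊢; omega)])
    PySem.Dict.empty (by simp [PySem.Dict.keys, PySem.Dict.empty])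
  have hemp : pvMapCnt labels PySem.Dict.empty = PySem.Dict.empty := rfl
  rw [hemp] at h
  simp only [h]
  rfl
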